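-- pv_equiv track=rewrite | github.com/Kynlos/CI-CD-Monitor-Test | .github/scripts/send-notifications.py | _clean_commit_message
-- ===== SOURCE A (Python) =====
-- def _clean_commit_message(message: str) -> str:
--     """Remove Amp and other metadata from commit message"""
--     lines = message.split('\n')
--     cleaned_lines = []
--
--     for line in lines:
--         # Skip Amp-specific lines
--         if line.startswith('Amp-Thread-ID:'):
--             continue
--         if line.startswith('Co-authored-by: Amp'):
--             continue
--         # Add other lines
--         cleaned_lines.append(line)
--
--     return '\n'.join(cleaned_lines).strip()
-- ===== SOURCE B (Python) =====
-- import re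
--
-- _AMP_LINE_RE = re.compile(r'^(?:Amp-Thread-ID:|Co-authored-by: Amp).*\n?', re.MULTILINE)
--
--
-- def _clean_commit_message(message: str) -> str:
--     """Remove Amp and other metadata from commit message"""
--     return _AMP_LINE_RE.sub('', message).strip()
-- ===== Notes on version B (the rewrite author's own statement) =====
-- stated objective: idiomatic
-- what changed: Replaced the split/loop/append/join pipeline with a single multiline regex substitution that deletes whole Amp metadata lines (with their newline) from the string in one pass, followed by strip().
import Mathlib
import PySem

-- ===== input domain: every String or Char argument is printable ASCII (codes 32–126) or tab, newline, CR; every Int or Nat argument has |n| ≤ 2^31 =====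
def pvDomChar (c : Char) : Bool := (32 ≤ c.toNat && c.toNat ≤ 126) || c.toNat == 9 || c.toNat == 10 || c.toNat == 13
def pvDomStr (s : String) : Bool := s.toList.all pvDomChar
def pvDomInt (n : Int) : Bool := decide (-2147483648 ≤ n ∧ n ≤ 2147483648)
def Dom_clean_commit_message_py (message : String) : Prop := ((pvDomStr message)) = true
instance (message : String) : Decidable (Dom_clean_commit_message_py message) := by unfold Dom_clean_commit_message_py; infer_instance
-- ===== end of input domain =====

-- B replaces A's split/loop/append/join pipeline with one multiline-regex substitution
-- deleting whole Amp metadata lines (with their newline) followed by strip(); idiomatic, same cost.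

-- ===== PORT A =====
def clean_commit_message_py (message : String) : String :=
  let lines := PySem.Chars.splitOn message.toList "\n".toList
  let cleaned_lines := lines.foldl (fun acc line =>
    if PySem.Chars.startswith line "Amp-Thread-ID:".toList then acc
    else if PySem.Chars.startswith line "Co-authored-by: Amp".toList then acc
    else acc ++ [line]) ([] : List (List Char))
  String.mk (PySem.Chars.strip (PySem.Chars.join "\n".toList cleaned_lines))

-- ===== PORT B =====
-- B is a single regex substitution re.sub(r'^(?:Amp-Thread-ID:|Co-authored-by: Amp).*\n?', '', message, re.MULTILINE)
-- followed by .strip().  PySem has no regex engine, so the engine's behaviour on THIS fixed pattern is ported by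
-- hand, exactly: at each line start, if the line matches one of the two alternatives, the whole line together with
-- its newline (the '.*\n?' part) is deleted and scanning resumes at the next line start; otherwise the line
-- (including its newline) is copied verbatim.  This is exact for this pattern: '.*' never matches '\n' and
-- re.MULTILINE anchors '^' at the string start and after every '\n'.

-- does the regex alternation (?:Amp-Thread-ID:|Co-authored-by: Amp) match at this position?
def pvAmpMatch (cs : List Char) : Bool :=
  PySem.Chars.startswith cs "Amp-Thread-ID:".toList ||
  PySem.Chars.startswith cs "Co-authored-by: Amp".toList

-- consume '.*\n?': drop everything up to and including the next '\n'
def pvDropLine : List Char → List Char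
  | [] => []
  | c :: rest => if c = '\n' then rest else pvDropLine rest

-- copy the current line up to and including its '\n', returning (copied, remainder)
def pvTakeLine : List Char → List Char × List Char
  | [] => ([], [])
  | c :: rest =>
    if c = '\n' then ([c], rest)
    else
      let p := pvTakeLine rest
      (c :: p.1, p.2)

theorem pvDropLine_length_le (cs : List Char) : (pvDropLine cs).length ≤ cs.length := by
  induction cs with
  | nil => simp [pvDropLine]
  | cons c rest ih =>
    simp only [pvDropLine]
    split <;> simp <;> omega

theorem pvTakeLine_length_le (cs : List Char) : (pvTakeLine cs).2.length ≤ cs.length := by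
  induction cs with
  | nil => simp [pvTakeLine]
  | cons c rest ih =>
    simp only [pvTakeLine]
    split <;> simp <;> omega

-- the regex-substitution scan (see the comment above)
def pvAmpSub : List Char → List Char
  | [] => []
  | c :: rest =>
    if pvAmpMatch (c :: rest) then pvAmpSub (pvDropLine (c :: rest))
    else
      let p := pvTakeLine (c :: rest)
      p.1 ++ pvAmpSub p.2
termination_by cs => cs.length
decreasing_by
  · have h := pvDropLine_length_le rest
    simp only [pvDropLine]
    split <;> simp <;> omega
  · have h := pvTakeLine_length_le rest
    simp only [pvTakeLine]
    split <;> simp <;> omega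

def clean_commit_message_py_alt (message : String) : String :=
  String.mk (PySem.Chars.strip (pvAmpSub message.toList))

-- ===== PRECONDITION & SPEC =====
def Spec_clean_commit_message_py (message : String) (out : String) : Prop := out = clean_commit_message_py_alt message
instance (message : String) (out : String) : Decidable (Spec_clean_commit_message_py message out) := by unfold Spec_clean_commit_message_py; infer_instance

-- ===== CLAIM (what is proved, stated in full; the proofs are below) =====
def Claim_equal_clean_commit_message_py : Prop := ∀ (message : String), Dom_clean_commit_message_py message → Spec_clean_commit_message_py message (clean_commit_message_py message)

-- ===== LEMMAS AND PROOFS =====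

-- a clean recursion computing Python's split('\n') (cur holds the current piece, reversed)
def pvSplit : List Char → List Char → List (List Char)
  | [], cur => [cur.reverse]
  | c :: rest, cur => if c = '\n' then cur.reverse :: pvSplit rest [] else pvSplit rest (c :: cur)

theorem pvSplit_go (fuel : Nat) : ∀ (l cur : List Char) (acc : List (List Char)), l.length < fuel →
    PySem.Chars.splitOn.go ['\n'] fuel l cur acc = acc.reverse ++ pvSplit l cur := by
  induction fuel with
  | zero => intro l cur acc h; omega
  | succ fuel ih =>
    intro l cur acc h
    cases l with
    | nil => simp [PySem.Chars.splitOn.go, pvSplit]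
    | cons c rest =>
      simp only [PySem.Chars.splitOn.go, pvSplit, List.isPrefixOf, Bool.and_true]
      by_cases hc : c = '\n'
      · subst hc
        simp only [BEq.rfl, if_pos]
        rw [ih _ _ _ (by simp at h ⊢; omega)]
        simp
      · have hbe : ('\n' == c) = false := by
          simp [BEq.comm]; intro h'; exact absurd h' hc
        rw [hbe]
        simp only [Bool.false_eq_true, if_neg, not_false_eq_true, if_neg hc]
        exact ih _ _ _ (by simp at h ⊢; omega)
theorem splitOn_eq_pvSplit (s : List Char) : PySem.Chars.splitOn s ['\n'] = pvSplit s [] := by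
  unfold PySem.Chars.splitOn
  rw [pvSplit_go _ _ _ _ (by omega)]
  simp
def pvKeep (l : List Char) : Bool := !(pvAmpMatch l)

theorem foldl_eq_filter (lines : List (List Char)) :
    lines.foldl (fun acc line =>
      if PySem.Chars.startswith line "Amp-Thread-ID:".toList then acc
      else if PySem.Chars.startswith line "Co-authored-by: Amp".toList then acc
      else acc ++ [line]) ([] : List (List Char)) = lines.filter pvKeep := by
  have hfn : (fun (acc : List (List Char)) line =>
      if PySem.Chars.startswith line "Amp-Thread-ID:".toList then acc
      else if PySem.Chars.startswith line "Co-authored-by: Amp".toList then acc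
      else acc ++ [line]) = (fun acc line => if pvKeep line then acc ++ [id line] else acc) := by
    funext acc line
    cases h1 : PySem.Chars.startswith line "Amp-Thread-ID:".toList <;>
      cases h2 : PySem.Chars.startswith line "Co-authored-by: Amp".toList <;>
      simp only [pvKeep, pvAmpMatch, h1, h2] <;> simp
  rw [hfn, PySem.List.foldl_append_if]
  simp
theorem pvSplit_no_newline (s : List Char) (h : '\n' ∉ s) : ∀ cur, pvSplit s cur = [cur.reverse ++ s] := by
  induction s with
  | nil => intro cur; simp [pvSplit]
  | cons c rest ih =>
    intro cur
    have hc : ¬ c = '\n' := fun hc => h (hc ▸ List.mem_cons_self)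
    rw [pvSplit, if_neg hc, ih (fun hm => h (List.mem_cons_of_mem _ hm))]
    simp
theorem pvSplit_append (hd r : List Char) (h : '\n' ∉ hd) :
    ∀ cur, pvSplit (hd ++ '\n' :: r) cur = (cur.reverse ++ hd) :: pvSplit r [] := by
  induction hd with
  | nil => intro cur; simp [pvSplit]
  | cons c t ih =>
    intro cur
    have hc : ¬ c = '\n' := fun hc => h (hc ▸ List.mem_cons_self)
    rw [List.cons_append, pvSplit, if_neg hc, ih (fun hm => h (List.mem_cons_of_mem _ hm))]
    simp
theorem pvDropLine_no_newline (s : List Char) (h : '\n' ∉ s) : pvDropLine s = [] := by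
  induction s with
  | nil => rfl
  | cons c rest ih =>
    have hc : ¬ c = '\n' := fun hc => h (hc ▸ List.mem_cons_self)
    rw [pvDropLine, if_neg hc, ih (fun hm => h (List.mem_cons_of_mem _ hm))]
theorem pvTakeLine_no_newline (s : List Char) (h : '\n' ∉ s) : pvTakeLine s = (s, []) := by
  induction s with
  | nil => rfl
  | cons c rest ih =>
    have hc : ¬ c = '\n' := fun hc => h (hc ▸ List.mem_cons_self)
    rw [pvTakeLine, if_neg hc]
    simp [ih (fun hm => h (List.mem_cons_of_mem _ hm))]
theorem pvDropLine_append (hd r : List Char) (h : '\n' ∉ hd) : pvDropLine (hd ++ '\n' :: r) = r := by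
  induction hd with
  | nil => simp [pvDropLine]
  | cons c t ih =>
    have hc : ¬ c = '\n' := fun hc => h (hc ▸ List.mem_cons_self)
    rw [List.cons_append, pvDropLine, if_neg hc, ih (fun hm => h (List.mem_cons_of_mem _ hm))]
theorem pvTakeLine_append (hd r : List Char) (h : '\n' ∉ hd) :
    pvTakeLine (hd ++ '\n' :: r) = (hd ++ ['\n'], r) := by
  induction hd with
  | nil => simp [pvTakeLine]
  | cons c t ih =>
    have hc : ¬ c = '\n' := fun hc => h (hc ▸ List.mem_cons_self)
    rw [List.cons_append, pvTakeLine, if_neg hc]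
    simp [ih (fun hm => h (List.mem_cons_of_mem _ hm))]
theorem startswith_append_newline (p hd r : List Char) (hp : '\n' ∉ p) :
    PySem.Chars.startswith (hd ++ '\n' :: r) p = PySem.Chars.startswith hd p := by
  rw [Bool.eq_iff_iff, PySem.Chars.startswith_iff, PySem.Chars.startswith_iff]
  constructor
  · intro hpre
    have hlen : p.length ≤ hd.length := by
      by_contra hlt
      rw [not_le] at hlt
      obtain ⟨t, ht⟩ := hpre
      have hget : (p ++ t)[hd.length]? = p[hd.length]? :=
        List.getElem?_append_left hlt
      rw [ht, List.getElem?_append_right (le_refl _), Nat.sub_self] at hget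
      have : '\n' ∈ p := List.mem_of_getElem? hget.symm
      exact hp this
    exact List.prefix_of_prefix_length_le hpre (List.prefix_append hd _) hlen
  · intro hpre
    exact hpre.trans (List.prefix_append hd _)
theorem pvAmpMatch_append (hd r : List Char) :
    pvAmpMatch (hd ++ '\n' :: r) = pvAmpMatch hd := by
  unfold pvAmpMatch
  rw [startswith_append_newline _ _ _ (by decide), startswith_append_newline _ _ _ (by decide)]
theorem pvAmpSub_ne_nil (s : List Char) (h : s ≠ []) :
    pvAmpSub s = if pvAmpMatch s then pvAmpSub (pvDropLine s) else (pvTakeLine s).1 ++ pvAmpSub (pvTakeLine s).2 := by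
  cases s with
  | nil => exact absurd rfl h
  | cons c rest => rw [pvAmpSub]
theorem pvMain : ∀ (n : Nat) (s : List Char), s.length ≤ n →
    ∃ k, pvAmpSub s = PySem.Chars.join ['\n'] (List.filter pvKeep (pvSplit s [])) ++ List.replicate k '\n' := by
  intro n
  induction n with
  | zero =>
    intro s hs
    have : s = [] := List.eq_nil_of_length_eq_zero (Nat.le_zero.mp hs)
    subst this
    refine ⟨0, ?_⟩
    rw [show pvAmpSub [] = [] from by simp [pvAmpSub]]
    simp [pvSplit, pvKeep, pvAmpMatch, PySem.Chars.join_singleton, PySem.Chars.startswith]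
  | succ n ih =>
    intro s hs
    by_cases hmem : '\n' ∈ s
    · -- s = hd ++ '\n' :: r with '\n' ∉ hd
      set hd := s.takeWhile (fun c => c != '\n') with hhd
      set d := s.dropWhile (fun c => c != '\n') with hdd
      have hw : hd ++ d = s := List.takeWhile_append_dropWhile
      have hdne : d ≠ [] := by
        intro h0
        rw [h0, List.append_nil] at hw
        have := List.mem_takeWhile_imp (l := s) (p := fun c => c != '\n') (hw ▸ hmem)
        simp at this
      have hhead : ((d.head hdne) != '\n') = false := List.head_dropWhile_not _ hdne
      have hheadeq : d.head hdne = '\n' := by simpa using hhead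
      obtain ⟨r, hr⟩ : ∃ r, d = '\n' :: r := by
        cases hdc : d with
        | nil => exact absurd hdc hdne
        | cons a t =>
          refine ⟨t, ?_⟩
          have : a = '\n' := by simp only [hdc, List.head_cons] at hheadeq; exact hheadeq
          rw [this]
      have hnhd : '\n' ∉ hd := by
        intro hm
        have := List.mem_takeWhile_imp hm
        simp at this
      have hs' : s = hd ++ '\n' :: r := by rw [← hw, hr]
      have hrlen : r.length ≤ n := by
        have := congrArg List.length hs'
        simp at this
        omega
      have hsne : s ≠ [] := by rw [hs']; simp
      have hsplit : pvSplit s [] = hd :: pvSplit r [] := by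
        rw [hs', pvSplit_append hd r hnhd]; simp
      have hmatch : pvAmpMatch s = pvAmpMatch hd := by rw [hs', pvAmpMatch_append]
      obtain ⟨k, hk⟩ := ih r hrlen
      by_cases hm : pvAmpMatch hd = true
      · refine ⟨k, ?_⟩
        rw [pvAmpSub_ne_nil s hsne, hmatch, if_pos hm, hs', pvDropLine_append hd r hnhd, ← hs', hsplit]
        rw [List.filter_cons_of_neg (by simp [pvKeep, hm])]
        exact hk
      · have hm' : pvAmpMatch hd = false := Bool.eq_false_iff.mpr hm
        have hkeep : pvKeep hd = true := by simp [pvKeep, hm']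
        rw [pvAmpSub_ne_nil s hsne, hmatch, if_neg hm, hs', pvTakeLine_append hd r hnhd]
        simp only
        rw [pvSplit_append hd r hnhd []]
        simp only [List.reverse_nil, List.nil_append]
        rw [List.filter_cons_of_pos hkeep, hk]
        cases hK : List.filter pvKeep (pvSplit r []) with
        | nil =>
          refine ⟨k + 1, ?_⟩
          rw [PySem.Chars.join_singleton, PySem.Chars.join_nil, List.replicate_succ]
          simp
        | cons q t =>
          refine ⟨k, ?_⟩
          rw [PySem.Chars.join_cons_cons]
          simp
    · -- no newline in s
      have hsplit : pvSplit s [] = [s] := by rw [pvSplit_no_newline s hmem]; simp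
      cases s with
      | nil =>
        refine ⟨0, ?_⟩
        rw [show pvAmpSub [] = [] from by simp [pvAmpSub]]
        simp [pvSplit, pvKeep, pvAmpMatch, PySem.Chars.join_singleton, PySem.Chars.startswith]
      | cons c rest =>
        rw [pvAmpSub_ne_nil _ (by simp), hsplit]
        by_cases hm : pvAmpMatch (c :: rest) = true
        · refine ⟨0, ?_⟩
          rw [if_pos hm, pvDropLine_no_newline _ hmem,
            List.filter_cons_of_neg (by simp [pvKeep, hm])]
          simp [pvAmpSub, PySem.Chars.join_nil]
        · have hm' : pvAmpMatch (c :: rest) = false := Bool.eq_false_iff.mpr hm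
          refine ⟨0, ?_⟩
          rw [if_neg hm, pvTakeLine_no_newline _ hmem,
            List.filter_cons_of_pos (by simp [pvKeep, hm']), List.filter_nil]
          simp [pvAmpSub, PySem.Chars.join_singleton]
theorem dropWhile_replicate_newline (k : Nat) :
    List.dropWhile PySem.Chars.isspace (List.replicate k '\n') = [] := by
  induction k with
  | zero => rfl
  | succ k ih => rw [List.replicate_succ, List.dropWhile_cons_of_pos (by decide), ih]
theorem strip_append_replicate (x : List Char) (k : Nat) :
    PySem.Chars.strip (x ++ List.replicate k '\n') = PySem.Chars.strip x := by
  unfold PySem.Chars.strip PySem.Chars.lstrip PySem.Chars.rstrip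
  rw [List.dropWhile_append]
  by_cases hx : (List.dropWhile PySem.Chars.isspace x).isEmpty
  · rw [if_pos hx, dropWhile_replicate_newline]
    rw [List.isEmpty_iff] at hx
    rw [hx]
  · rw [if_neg hx]
    rw [List.reverse_append, List.reverse_replicate, List.dropWhile_append,
      dropWhile_replicate_newline]
    simp
-- ===== VERDICT (by name: the statement is the Claim_ definition above) =====
theorem clean_commit_message_py_spec : Claim_equal_clean_commit_message_py := by
  intro message _
  unfold Spec_clean_commit_message_py clean_commit_message_py clean_commit_message_py_alt
  simp only
  have hnl : "
".toList = ['
'] := rfl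
  rw [hnl, splitOn_eq_pvSplit, foldl_eq_filter]
  obtain ⟨k, hk⟩ := pvMain message.toList.length message.toList (le_refl _)
  rw [hk, strip_append_replicate]
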